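-- pv_equiv track=rewrite | github.com/cursland/markast | markast/widgets/builtin/code_group.py | _format_highlight
-- ===== SOURCE A (Python) =====
-- from typing import Any, Callable, Dict, List
--
-- def _format_highlight(lines: List[int]) -> str:
--     if not lines:
--         return ""
--     srt = sorted(set(lines))
--     out: List[str] = []
--     s = e = srt[0]
--     for x in srt[1:]:
--         if x == e + 1:
--             e = x
--         else:
--             out.append(f"{s}-{e}" if s != e else str(s))
--             s = e = x
--     out.append(f"{s}-{e}" if s != e else str(s))
--     return ",".join(out)
-- ===== SOURCE B (Python) =====
-- from itertools import groupby
-- from typing import List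
--
-- def _format_highlight(lines: List[int]) -> str:
--     if not lines:
--         return ""
--     srt = sorted(set(lines))
--     out: List[str] = []
--     for _key, grp in groupby(enumerate(srt), key=lambda p: p[1] - p[0]):
--         vals = [v for _, v in grp]
--         first, last = vals[0], vals[-1]
--         out.append(f"{first}-{last}" if first != last else str(first))
--     return ",".join(out)
-- ===== Notes on version B (the rewrite author's own statement) =====
-- stated objective: idiomatic
-- what changed: Replaces A's inline start/end state machine with the classic itertools.groupby(enumerate(sorted_values), key=value-index) run decomposition: each maximal consecutive run becomes one materialized group, formatted from its first and last values.
import Mathlib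
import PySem

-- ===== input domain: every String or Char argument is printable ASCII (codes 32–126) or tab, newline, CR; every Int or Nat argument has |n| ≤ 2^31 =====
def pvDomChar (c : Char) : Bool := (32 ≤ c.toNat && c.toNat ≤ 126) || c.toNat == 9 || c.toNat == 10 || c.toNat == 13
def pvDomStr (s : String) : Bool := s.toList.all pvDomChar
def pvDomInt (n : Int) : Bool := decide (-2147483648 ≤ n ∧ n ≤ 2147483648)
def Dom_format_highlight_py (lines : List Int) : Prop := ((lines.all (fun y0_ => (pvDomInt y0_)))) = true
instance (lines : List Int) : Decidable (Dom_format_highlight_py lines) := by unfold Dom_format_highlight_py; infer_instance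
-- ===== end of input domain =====

-- B replaces A's inline start/end state machine by the idiomatic groupby(enumerate(srt), key=value-index)
-- run decomposition; same cost, different decomposition (objective: idiomatic).

-- ===== PORT A =====
-- f"{s}-{e}" if s != e else str(s)
def pvFmtA (s e : Int) : String :=
  if s ≠ e then PySem.Int.toStr s ++ "-" ++ PySem.Int.toStr e else PySem.Int.toStr s

def format_highlight_py (lines : List Int) : String :=
  if lines = [] then "" else
  match PySem.List.sorted (PySem.Set.ofList lines) (fun x => x) false with
  | [] => ""   -- unreachable: sorted(set(lines)) of a nonempty list is nonempty
  | h :: t =>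
    let st := t.foldl (fun (acc : List String × Int × Int) x =>
      match acc with
      | (out, s, e) =>
        if x = e + 1 then (out, s, x) else (out ++ [pvFmtA s e], x, x)) ([], h, h)
    PySem.Str.join "," (st.1 ++ [pvFmtA st.2.1 st.2.2])

-- ===== PORT B =====
-- itertools.groupby by key (materialized groups, in order)
def pvGroupBy {α : Type} (f : α → Int) : List α → List (List α)
  | [] => []
  | x :: xs =>
    match pvGroupBy f xs with
    | [] => [[x]]
    | [] :: gs => [x] :: gs  -- unreachable: groups are nonempty
    | (y :: g) :: gs => if f x = f y then (x :: y :: g) :: gs else [x] :: (y :: g) :: gs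

-- vals[0], vals[-1]; f"{first}-{last}" if first != last else str(first)
def pvFmtGroup (vals : List Int) : String :=
  match vals with
  | [] => ""  -- unreachable: groupby groups are nonempty
  | a :: r =>
    let b := r.getLastD a
    if a ≠ b then PySem.Int.toStr a ++ "-" ++ PySem.Int.toStr b else PySem.Int.toStr a

def format_highlight_py_alt (lines : List Int) : String :=
  if lines = [] then "" else
  let srt := PySem.List.sorted (PySem.Set.ofList lines) (fun x => x) false
  let groups := pvGroupBy (fun p => p.2 - p.1) (PySem.List.enumerate srt)
  PySem.Str.join "," (groups.map (fun g => pvFmtGroup (g.map Prod.snd)))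

-- ===== PRECONDITION & SPEC =====
def Spec_format_highlight_py (lines : List Int) (out : String) : Prop := out = format_highlight_py_alt lines
instance (lines : List Int) (out : String) : Decidable (Spec_format_highlight_py lines out) := by unfold Spec_format_highlight_py; infer_instance

-- ===== CLAIM (what is proved, stated in full; the proofs are below) =====
def Claim_equal_format_highlight_py : Prop := ∀ (lines : List Int), Dom_format_highlight_py lines → Spec_format_highlight_py lines (format_highlight_py lines)

-- ===== LEMMAS AND PROOFS =====

/-- The maximal consecutive runs of `h :: t`, as plain value lists. -/
def pvRuns (h : Int) : List Int → List (List Int)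
  | [] => [[h]]
  | x :: t =>
    if x = h + 1 then
      match pvRuns x t with
      | g :: gs => (h :: g) :: gs
      | [] => [[h]]
    else [h] :: pvRuns x t

/-- The formatted pieces produced from run-start `s`, current end `e`, remaining `t`. -/
def pvFmtRunsFrom (s e : Int) : List Int → List String
  | [] => [pvFmtA s e]
  | x :: t => if x = e + 1 then pvFmtRunsFrom s x t else pvFmtA s e :: pvFmtRunsFrom x x t

/-- Format a run list whose first run is still open with recorded start `s`. -/
def pvFmtRunsG (s : Int) : List (List Int) → List String
  | [] => []
  | g :: gs => pvFmtA s (g.getLastD s) :: gs.map pvFmtGroup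

theorem pvRuns_cons_struct (t : List Int) (e : Int) :
    ∃ g gs, pvRuns e t = (e :: g) :: gs := by
  cases t with
  | nil => exact ⟨[], [], rfl⟩
  | cons x t =>
    by_cases hx : x = e + 1
    · subst hx
      obtain ⟨g, gs, hg⟩ := pvRuns_cons_struct t (e + 1)
      exact ⟨(e + 1) :: g, gs, by simp [pvRuns, hg]⟩
    · exact ⟨[], pvRuns x t, by simp [pvRuns, hx]⟩

theorem pvGroupBy_cons {α : Type} (f : α → Int) (x : α) (xs : List α) :
    pvGroupBy f (x :: xs) = (match pvGroupBy f xs with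
      | [] => [[x]]
      | [] :: gs => [x] :: gs
      | (y :: g) :: gs => if f x = f y then (x :: y :: g) :: gs else [x] :: (y :: g) :: gs) := rfl

theorem pvGroupBy_cons_struct {α : Type} (f : α → Int) (q : α) (qs : List α) :
    ∃ g gs, pvGroupBy f (q :: qs) = (q :: g) :: gs := by
  rw [pvGroupBy_cons]
  cases hq : pvGroupBy f qs with
  | nil => exact ⟨[], [], rfl⟩
  | cons g0 gs =>
    cases g0 with
    | nil => exact ⟨[], gs, rfl⟩
    | cons y g =>
      by_cases hf : f q = f y
      · exact ⟨y :: g, gs, by simp [hf]⟩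
      · exact ⟨[], (y :: g) :: gs, by simp [hf]⟩

/-- A-side: the state-machine fold produces exactly the run pieces. -/
theorem pvFoldA_eq (t : List Int) : ∀ (out : List String) (s e : Int),
    (let st := t.foldl (fun (acc : List String × Int × Int) x =>
      match acc with
      | (o, s', e') =>
        if x = e' + 1 then (o, s', x) else (o ++ [pvFmtA s' e'], x, x)) (out, s, e)
     st.1 ++ [pvFmtA st.2.1 st.2.2]) = out ++ pvFmtRunsFrom s e t := by
  induction t with
  | nil => intro out s e; simp [pvFmtRunsFrom]
  | cons x t ih =>
    intro out s e
    by_cases hx : x = e + 1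
    · simpa [List.foldl, hx, pvFmtRunsFrom] using ih out s x
    · simpa [List.foldl, hx, pvFmtRunsFrom] using ih (out ++ [pvFmtA s e]) x x

/-- groupby(enumerate …, key = value − index) computes exactly the consecutive runs. -/
theorem pvGroupBy_enum_eq (t : List Int) : ∀ (h i : Int),
    (pvGroupBy (fun p : Int × Int => p.2 - p.1) (PySem.List.enumerate (h :: t) i)).map (List.map Prod.snd)
      = pvRuns h t := by
  induction t with
  | nil => intro h i; simp [PySem.List.enumerate_cons, pvGroupBy, pvRuns]
  | cons x t ih =>
    intro h i
    obtain ⟨g, gs, hg⟩ := pvGroupBy_cons_struct (fun p : Int × Int => p.2 - p.1)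
      ((i+1, x)) (PySem.List.enumerate t (i+1+1))
    have ihx := ih x (i+1)
    rw [PySem.List.enumerate_cons, hg] at ihx
    rw [show PySem.List.enumerate (h :: x :: t) i
        = (i, h) :: (i+1, x) :: PySem.List.enumerate t (i+1+1) by
      simp [PySem.List.enumerate_cons], pvGroupBy_cons, hg]
    simp only []
    by_cases hx : x = h + 1
    · rw [if_pos (show h - i = x - (i + 1) by omega), pvRuns]
      simp only [if_pos hx]
      obtain ⟨g', gs', hr⟩ := pvRuns_cons_struct t x
      rw [hr]
      rw [hr] at ihx
      simp only [List.map_cons] at ihx ⊢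
      injection ihx with h1 h2
      injection h1 with _ h1'
      simp [h1', h2]
    · rw [if_neg (show ¬ h - i = x - (i + 1) by omega), pvRuns]
      simp only [if_neg hx, List.map_cons]
      simp only [List.map_cons] at ihx
      simp [ihx]

theorem pvFmtGroup_cons (a : Int) (r : List Int) :
    pvFmtGroup (a :: r) = pvFmtA a (r.getLastD a) := rfl

theorem pvFmtRunsG_eq_map (t : List Int) (e : Int) :
    pvFmtRunsG e (pvRuns e t) = (pvRuns e t).map pvFmtGroup := by
  obtain ⟨g, gs, hr⟩ := pvRuns_cons_struct t e
  rw [hr]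
  simp only [pvFmtRunsG, List.map_cons, pvFmtGroup_cons, List.getLastD_cons]

/-- B-side: formatting the runs equals the A-side piece list. -/
theorem pvFmtRunsFrom_eq (t : List Int) : ∀ (s e : Int),
    pvFmtRunsFrom s e t = pvFmtRunsG s (pvRuns e t) := by
  induction t with
  | nil => intro s e; simp [pvFmtRunsFrom, pvRuns, pvFmtRunsG]
  | cons x t ih =>
    intro s e
    by_cases hx : x = e + 1
    · rw [pvFmtRunsFrom]
      simp only [if_pos hx]
      rw [pvRuns]
      simp only [if_pos hx]
      obtain ⟨g, gs, hr⟩ := pvRuns_cons_struct t x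
      rw [hr, ih s x, hr]
      simp only [pvFmtRunsG, List.getLastD_cons]
    · rw [pvFmtRunsFrom]
      simp only [if_neg hx]
      rw [pvRuns]
      simp only [if_neg hx]
      rw [ih x x, pvFmtRunsG, pvFmtRunsG_eq_map]
      rfl

theorem pvSorted_set_ne_nil (lines : List Int) (hl : lines ≠ []) :
    PySem.List.sorted (PySem.Set.ofList lines) (fun x => x) false ≠ [] := by
  intro h
  rw [PySem.List.sorted_eq_nil_iff] at h
  cases lines with
  | nil => exact hl rfl
  | cons a l =>
    have : a ∈ PySem.Set.ofList (a :: l) := by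
      rw [PySem.Set.mem_ofList]; exact List.mem_cons_self
    rw [h] at this
    exact absurd this (List.not_mem_nil)

-- ===== VERDICT (by name: the statement is the Claim_ definition above) =====
theorem format_highlight_py_spec : Claim_equal_format_highlight_py := by
  intro lines _
  unfold Spec_format_highlight_py format_highlight_py format_highlight_py_alt
  by_cases hl : lines = []
  · simp [hl]
  · simp only [if_neg hl]
    cases hsrt : PySem.List.sorted (PySem.Set.ofList lines) (fun x => x) false with
    | nil => exact absurd hsrt (pvSorted_set_ne_nil lines hl)
    | cons h t =>
      have hA := pvFoldA_eq t [] h h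
      simp only at hA
      refine congrArg (PySem.Str.join ",") ?_
      rw [hA]
      have hB : (pvGroupBy (fun p : Int × Int => p.2 - p.1)
            (PySem.List.enumerate (h :: t) 0)).map (fun g => pvFmtGroup (g.map Prod.snd))
          = pvFmtRunsFrom h h t := by
        rw [show (fun g : List (Int × Int) => pvFmtGroup (g.map Prod.snd))
              = pvFmtGroup ∘ List.map Prod.snd from rfl, ← List.map_map,
            pvGroupBy_enum_eq t h 0, pvFmtRunsFrom_eq, pvFmtRunsG_eq_map]
      simpa using hB.symm
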